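-- pv_equiv track=rewrite | github.com/diyarkudrat/bas_temperature_control_bas_system | tests/unit/firestore/mock/mock_utils.py | validate_mock_role
-- ===== SOURCE A (Python) =====
-- def validate_mock_role(role: str) -> bool:
--     """
--     Validate mock role format.
--     Allows: alphanumeric, underscores, hyphens, unicode characters
--     Rejects: empty, whitespace, special characters, spaces, etc.
--     """
--     if not role or not isinstance(role, str):
--         return False
--
--     # Check for empty or whitespace-only
--     if not role.strip():
--         return False
--
--     # Check length (reasonable limit)
--     if len(role) > 100:
--         return False
--
--     # Check for invalid characters (allow unicode)
--     invalid_chars = [' ', '\n', '\t', '@', '<', '>', "'", '"', ';', '(', ')', '{', '}', '[', ']', '|', '\\', '/']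
--     for char in invalid_chars:
--         if char in role:
--             return False
--
--     # Must contain at least one alphanumeric character (including unicode)
--     if not any(c.isalnum() for c in role):
--         return False
--
--     return True
-- ===== SOURCE B (Python) =====
-- def validate_mock_role(role: str) -> bool:
--     # Whitespace-only strings can never validate anyway (whitespace chars are
--     # either in the invalid set or non-alphanumeric), so the empty/strip guards
--     # are unnecessary: one length guard plus a single pass over the characters.
--     if not isinstance(role, str) or len(role) > 100:
--         return False
--     invalid = set(" \n\t@<>'\";(){}[]|\\/")
--     has_alnum = False
--     for c in role:
--         if c in invalid:
--             return False
--         if c.isalnum():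
--             has_alnum = True
--     return has_alnum
-- ===== Notes on version B (the rewrite author's own statement) =====
-- stated objective: simpler
-- what changed: Drops the redundant empty-string and whitespace-only guards (whitespace characters are invalid or non-alphanumeric, so such strings fail anyway) and replaces A's 18 substring scans plus a separate alnum scan with one pass over the characters tracking has_alnum.
import Mathlib
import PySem

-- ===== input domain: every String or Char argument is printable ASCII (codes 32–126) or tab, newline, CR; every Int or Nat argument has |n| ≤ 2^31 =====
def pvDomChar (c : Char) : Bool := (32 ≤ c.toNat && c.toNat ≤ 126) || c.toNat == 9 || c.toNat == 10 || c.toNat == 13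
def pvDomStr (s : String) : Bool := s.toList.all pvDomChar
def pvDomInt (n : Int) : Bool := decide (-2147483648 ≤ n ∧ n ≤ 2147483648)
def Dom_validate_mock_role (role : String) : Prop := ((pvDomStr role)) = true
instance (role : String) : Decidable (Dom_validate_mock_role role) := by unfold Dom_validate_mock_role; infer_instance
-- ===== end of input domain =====

-- B drops the redundant empty/whitespace-only guards (whitespace chars are invalid or non-alnum anyway)
-- and replaces A's 18 substring scans plus a separate alnum scan with one pass over the characters (simpler).


-- ===== PORT A =====
def aInvalidChars : List Char := [' ', '\n', '\t', '@', '<', '>', '\'', '"', ';', '(', ')', '{', '}', '[', ']', '|', '\\', '/']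

def validate_mock_role (role : String) : Bool :=
  if role.toList = [] then false
  else if (PySem.Str.strip role).toList = [] then false
  else if 100 < PySem.Str.len role then false
  else if aInvalidChars.any (fun c => PySem.Chars.isIn [c] role.toList) then false
  else if !(role.toList.any PySem.Chars.isalnum) then false
  else true

-- ===== PORT B =====
def bInvalid : PySem.Set Char := PySem.Set.ofList " \n\t@<>'\";(){}[]|\\/".toList

def bScan : List Char → Bool → Bool
  | [], has_alnum => has_alnum
  | c :: rest, has_alnum =>
    if PySem.Set.contains bInvalid c then false
    else bScan rest (if PySem.Chars.isalnum c then true else has_alnum)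

def validate_mock_role_alt (role : String) : Bool :=
  if 100 < PySem.Str.len role then false
  else bScan role.toList false

-- ===== PRECONDITION & SPEC =====
def Spec_validate_mock_role (role : String) (out : Bool) : Prop := out = validate_mock_role_alt role
instance (role : String) (out : Bool) : Decidable (Spec_validate_mock_role role out) := by unfold Spec_validate_mock_role; infer_instance

-- ===== CLAIM (what is proved, stated in full; the proofs are below) =====
def Claim_equal_validate_mock_role : Prop := ∀ (role : String), Dom_validate_mock_role role → Spec_validate_mock_role role (validate_mock_role role)

-- ===== LEMMAS AND PROOFS =====
-- B's single loop, characterised: false if an invalid char occurs, else the accumulator or-ed with the alnum scan.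
lemma bScan_spec (l : List Char) (has : Bool) :
    bScan l has =
      if l.any (fun c => PySem.Set.contains bInvalid c) then false
      else (has || l.any PySem.Chars.isalnum) := by
  induction l generalizing has with
  | nil => simp [bScan]
  | cons c rest ih =>
    simp only [bScan, List.any_cons]
    by_cases h : c ∈ bInvalid
    · simp [PySem.Set.contains, h]
    · rw [if_neg (by simp [PySem.Set.contains, h]), ih]
      rcases Bool.eq_false_or_eq_true (PySem.Chars.isalnum c) with ha | ha <;>
        simp [PySem.Set.contains, h, ha, Bool.or_comm]

-- A's per-invalid-character substring scans equal B's per-role-character membership scan.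
lemma any_isIn_comm (l : List Char) :
    (aInvalidChars.any fun c => PySem.Chars.isIn [c] l)
      = (l.any fun c => PySem.Set.contains bInvalid c) := by
  have hset : bInvalid = aInvalidChars := by decide
  rw [Bool.eq_iff_iff]
  simp only [List.any_eq_true, PySem.Chars.isIn_iff_infix, hset,
    List.singleton_infix_iff, PySem.Set.contains]
  constructor
  · rintro ⟨c, hc, hl⟩; exact ⟨c, hl, by simp [hc]⟩
  · rintro ⟨c, hl, hc⟩; exact ⟨c, by simpa using hc, hl⟩

-- A string whose Python strip() is empty consists of whitespace characters only.
lemma strip_nil_all_isspace (l : List Char) (h : PySem.Chars.strip l = []) :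
    ∀ c ∈ l, PySem.Chars.isspace c = true := by
  intro c hc
  unfold PySem.Chars.strip PySem.Chars.rstrip PySem.Chars.lstrip at h
  rw [List.reverse_eq_nil_iff, List.dropWhile_eq_nil_iff] at h
  have hsplit : c ∈ List.takeWhile PySem.Chars.isspace l ++ List.dropWhile PySem.Chars.isspace l := by
    rw [List.takeWhile_append_dropWhile]; exact hc
  rcases List.mem_append.mp hsplit with h1 | h1
  · exact List.mem_takeWhile_imp h1
  · exact h c (List.mem_reverse.mpr h1)

-- A whitespace character of the domain that is not in the invalid set must be '\r', which is not alphanumeric.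
lemma dom_space_char (c : Char) (hd : pvDomChar c = true) (hs : PySem.Chars.isspace c = true)
    (hni : PySem.Set.contains bInvalid c = false) : PySem.Chars.isalnum c = false := by
  have hmem : c.toNat = 9 ∨ c.toNat = 10 ∨ c.toNat = 13 ∨ c.toNat = 32 := by
    simp only [pvDomChar, PySem.Chars.isspace, Bool.or_eq_true, Bool.and_eq_true,
      decide_eq_true_eq, beq_iff_eq] at hd hs
    omega
  have hc : c = '\t' ∨ c = '\n' ∨ c = '\r' ∨ c = ' ' := by
    rcases hmem with h | h | h | h
    · exact Or.inl (by have := Char.ofNat_toNat c; rw [h] at this; exact this.symm)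
    · exact Or.inr (Or.inl (by have := Char.ofNat_toNat c; rw [h] at this; exact this.symm))
    · exact Or.inr (Or.inr (Or.inl (by have := Char.ofNat_toNat c; rw [h] at this; exact this.symm)))
    · exact Or.inr (Or.inr (Or.inr (by have := Char.ofNat_toNat c; rw [h] at this; exact this.symm)))
  rcases hc with h | h | h | h <;> subst h <;> revert hni <;> decide

-- ===== VERDICT (by name: the statement is the Claim_ definition above) =====
theorem validate_mock_role_spec : Claim_equal_validate_mock_role := by
  intro role hdom
  unfold Spec_validate_mock_role validate_mock_role validate_mock_role_alt
  rw [bScan_spec, ← any_isIn_comm]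
  by_cases h0 : role.toList = []
  · simp [h0, PySem.Str.len]
  · rw [if_neg h0]
    by_cases h1 : (PySem.Str.strip role).toList = []
    · rw [if_pos h1]
      split_ifs with h2 h3
      · rfl
      · rfl
      · have hws := strip_nil_all_isspace role.toList (by rwa [PySem.Str.toList_strip] at h1)
        have hdomc : ∀ c ∈ role.toList, pvDomChar c = true := by
          simpa [Dom_validate_mock_role, pvDomStr, List.all_eq_true] using hdom
        have hninv : ∀ c ∈ role.toList, PySem.Set.contains bInvalid c = false := by
          rw [any_isIn_comm] at h3
          intro c hc
          simpa using (List.any_eq_false.mp (Bool.eq_false_iff.mpr h3)) c hc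
        simp only [Bool.false_or]
        symm
        rw [List.any_eq_false]
        intro c hc
        simp [dom_space_char c (hdomc c hc) (hws c hc) (hninv c hc)]
    · rw [if_neg h1]
      split_ifs with h2 h3 h4 <;> simp_all
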